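-- pv_equiv track=rewrite | github.com/greggoren/textGen | summarization/create_data_set.py | apply_borda_in_dict
-- ===== SOURCE A (Python) =====
-- def indexes(res):
--     result = {}
--     for i,test in enumerate(res):
--         result[i]={}
--         for rank,idx in enumerate(test):
--             result[i][idx]=rank
--     return result
--
-- def  get_count(idx,result,len):
--     return sum([len-1-result[t][idx] for t in result])
--
-- def apply_borda_in_dict(results):
--     borda_counts = {}
--     num_of_tests = len(results[list(results.keys())[0]])
--     ranked_sentences = [sorted(list(results.keys()),key=lambda x:(results[x][j],x),reverse=True) for j in range(num_of_tests)]
--     ranks = indexes(ranked_sentences)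
--     length = len(results)
--     borda_counts ={idx:get_count(idx,ranks,length) for idx in results}
--     chosen_cand = max(list(borda_counts.keys()),key=lambda x:(borda_counts[x],x))
--     return chosen_cand
-- ===== SOURCE B (Python) =====
-- def apply_borda_in_dict(results):
--     ids = list(results.keys())
--     num_of_tests = len(results[ids[0]])
--     def score(i):
--         return sum(
--             sum(1 for c in ids if (results[c][j], c) < (results[i][j], i))
--             for j in range(num_of_tests))
--     return max(ids, key=lambda x: (score(x), x))
-- ===== Notes on version B (the rewrite author's own statement) =====
-- stated objective: simpler
-- what changed: B drops A's sort-rank-dictionary pipeline (per-test descending sort, a dict-of-dicts of rank indexes, then len-1-rank sums) and computes each candidate's Borda score directly as a pairwise tally: for each test j it counts the candidates c with (results[c][j], c) < (results[i][j], i); no sorting and no rank dictionaries.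
import Mathlib
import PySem

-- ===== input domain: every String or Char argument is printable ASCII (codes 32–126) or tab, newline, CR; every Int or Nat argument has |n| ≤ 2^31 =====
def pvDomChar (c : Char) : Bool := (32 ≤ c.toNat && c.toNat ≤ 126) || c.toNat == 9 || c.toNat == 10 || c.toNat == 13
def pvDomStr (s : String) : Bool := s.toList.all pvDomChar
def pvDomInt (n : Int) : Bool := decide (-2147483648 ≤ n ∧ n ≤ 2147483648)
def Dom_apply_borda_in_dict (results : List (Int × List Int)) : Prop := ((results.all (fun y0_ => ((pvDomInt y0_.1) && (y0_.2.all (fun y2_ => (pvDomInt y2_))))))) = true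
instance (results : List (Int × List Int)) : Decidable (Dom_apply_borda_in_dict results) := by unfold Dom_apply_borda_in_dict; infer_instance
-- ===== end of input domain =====

-- B replaces A's sort-and-rank-dictionary pipeline by a direct pairwise-win tally per test (simpler; same results).


-- ===== PORT A =====
-- indexes(res): dict i -> {sentence id -> its rank in res[i]}
def pvIndexes (res : List (List Int)) : PySem.Dict Int (PySem.Dict Int Int) :=
  (PySem.List.enumerate res).foldl
    (fun result p =>
      result.insert p.1
        ((PySem.List.enumerate p.2).foldl (fun inner q => inner.insert q.2 q.1) PySem.Dict.empty))
    PySem.Dict.empty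

-- get_count(idx, result, len) = sum(len-1-result[t][idx] for t in result)
def pvGetCount (idx : Int) (result : PySem.Dict Int (PySem.Dict Int Int)) (len : Int) : Int :=
  ((result.keys).map (fun t => len - 1 - ((result.getD t PySem.Dict.empty).getD idx 0))).sum

def apply_borda_in_dict (results : List (Int × List Int)) : Int :=
  let d := PySem.Dict.ofList results
  match PySem.List.pyGet? d.keys 0 with
  | none => 0   -- list(results.keys())[0] raises IndexError (empty dict); outside Pre_
  | some k0 =>
    let num_of_tests : Int := ((d.getD k0 []).length : Int)
    -- results[x][j] raises IndexError on a too-short row; those inputs are outside Pre_ (the .getD 0 is unreachable inside Pre_)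
    let ranked_sentences := (PySem.List.pyRange 0 num_of_tests 1).map (fun j =>
      PySem.List.sorted2 d.keys (fun x => (PySem.List.pyGet? (d.getD x []) j).getD 0) (fun x => x) true)
    let ranks := pvIndexes ranked_sentences
    let length : Int := (d.keys.length : Int)
    let borda_counts := d.keys.foldl
      (fun b idx => b.insert idx (pvGetCount idx ranks length)) PySem.Dict.empty
    (PySem.List.max2? borda_counts.keys (fun x => borda_counts.getD x 0) (fun x => x)).getD 0

-- ===== PORT B =====
def apply_borda_in_dict_alt (results : List (Int × List Int)) : Int :=
  let d := PySem.Dict.ofList results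
  let ids := d.keys
  match PySem.List.pyGet? ids 0 with
  | none => 0   -- same IndexError as A on an empty dict; outside Pre_
  | some k0 =>
    let num_of_tests : Int := ((d.getD k0 []).length : Int)
    let sc := fun (x j : Int) => (PySem.List.pyGet? (d.getD x []) j).getD 0
    let score := fun (i : Int) =>
      ((PySem.List.pyRange 0 num_of_tests 1).map (fun j =>
        ((ids.filter (fun c => decide (sc c j < sc i j ∨ (sc c j = sc i j ∧ c < i)))).length : Int))).sum
    (PySem.List.max2? ids score (fun x => x)).getD 0

-- ===== PRECONDITION & SPEC =====
-- Pre_ excludes exactly the inputs where A raises: the empty dict (IndexError on keys[0]) and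
-- dicts in which some row is shorter than the first key's row (IndexError in the sort key).
def Pre_apply_borda_in_dict (results : List (Int × List Int)) : Prop :=
  (PySem.Dict.ofList results).items ≠ [] ∧
    ∀ p ∈ (PySem.Dict.ofList results).items,
      ((PySem.Dict.ofList results).items.headI).2.length ≤ p.2.length
instance (results : List (Int × List Int)) : Decidable (Pre_apply_borda_in_dict results) := by
  unfold Pre_apply_borda_in_dict; infer_instance

def pvWitness_apply_borda_in_dict : (List (Int × List Int)) := [(0, [1, 5]), (1, [2, 3]), (2, [2, 4])]

def Spec_apply_borda_in_dict (results : List (Int × List Int)) (out : Int) : Prop := out = apply_borda_in_dict_alt results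
instance (results : List (Int × List Int)) (out : Int) : Decidable (Spec_apply_borda_in_dict results out) := by unfold Spec_apply_borda_in_dict; infer_instance

-- ===== CLAIM (what is proved, stated in full; the proofs are below) =====
def Claim_equal_apply_borda_in_dict : Prop := ∀ (results : List (Int × List Int)), Dom_apply_borda_in_dict results → Pre_apply_borda_in_dict results → Spec_apply_borda_in_dict results (apply_borda_in_dict results)

-- ===== LEMMAS AND PROOFS =====

-- the lexicographic key (score, id) that drives both A's descending sort and B's pairwise tally
def pvKey (k1 : Int → Int) (x : Int) : Lex (Int × Int) := toLex (k1 x, x)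

-- A's sorted2 with tuple key (k1 x, x), reverse=True, IS sorted by the lexicographic key
lemma pv_sorted2_eq_sorted (xs : List Int) (k1 : Int → Int) :
    PySem.List.sorted2 xs k1 (fun x => x) true = PySem.List.sorted xs (pvKey k1) true := by
  rw [PySem.List.sorted_rev_eq_foldl_insertBy]
  show List.foldl (fun acc x => PySem.List.insertBy _ x acc) [] xs = _
  congr 1
  funext acc x
  congr 1
  funext a b
  simp only [pvKey, Prod.Lex.lt_iff]
  by_cases h1 : k1 b < k1 a <;> by_cases h2 : k1 a < k1 b <;> by_cases h3 : (b : Int) < a <;>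
    simp [h1, h2, h3] <;> omega

lemma pv_key_inj (k1 : Int → Int) : Function.Injective (pvKey k1) := by
  intro a b h
  exact congrArg (fun p => (ofLex p).2) h

-- the descending sort of a duplicate-free list is STRICTLY descending in the lexicographic key
lemma pv_sorted_strict (xs : List Int) (k1 : Int → Int) (hnd : xs.Nodup) :
    (PySem.List.sorted xs (pvKey k1) true).Pairwise (fun a b => pvKey k1 b < pvKey k1 a) := by
  have hle := PySem.List.sorted_pairwise_rev xs (pvKey k1)
  have hnd' : (PySem.List.sorted xs (pvKey k1) true).Nodup :=
    (PySem.List.sorted_perm xs (pvKey k1) true).nodup_iff.mpr hnd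
  exact (hle.and hnd').imp (fun h =>
    lt_of_le_of_ne h.1 (fun e => h.2 ((pv_key_inj k1 e).symm)))

-- in a strictly descending list, the number of elements below position r's element is length - r - 1
lemma pv_count_lt (k1 : Int → Int) :
    ∀ (L : List Int) (r : Nat) (i : Int),
      L.Pairwise (fun a b => pvKey k1 b < pvKey k1 a) → L[r]? = some i →
      L.countP (fun c => decide (pvKey k1 c < pvKey k1 i)) = L.length - r - 1 := by
  intro L
  induction L with
  | nil => intro r i _ h; simp at h
  | cons a t ih =>
    intro r i hpw h
    rcases List.pairwise_cons.mp hpw with ⟨ha, hpt⟩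
    cases r with
    | zero =>
      simp at h
      subst h
      rw [List.countP_cons]
      have : t.countP (fun c => decide (pvKey k1 c < pvKey k1 a)) = t.length :=
        List.countP_eq_length.mpr (fun c hc => by simpa using ha c hc)
      simp [this]
    | succ s =>
      simp only [List.getElem?_cons_succ] at h
      have hi : i ∈ t := List.mem_of_getElem? h
      have hlt : pvKey k1 i < pvKey k1 a := ha i hi
      have hs : s < t.length := by
        by_contra hs
        rw [List.getElem?_eq_none (by omega)] at h
        simp at h
      rw [List.countP_cons_of_neg (by simp [not_lt_of_gt hlt])]
      have hrec := ih s i hpt h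
      simp only [List.length_cons]
      omega

-- rank-index dict of one ranked list: looking up the element at position r yields r
lemma pv_inner_getD (L : List Int) (hnd : L.Nodup) (r : Nat) (i : Int) (h : L[r]? = some i) :
    ((PySem.List.enumerate L).foldl (fun inner q => inner.insert q.2 q.1)
        PySem.Dict.empty).getD i 0 = (r : Int) := by
  have hfresh : ∀ q ∈ PySem.List.enumerate L, (PySem.Dict.empty : PySem.Dict Int Int).contains q.2 = false :=
    fun q _ => PySem.Dict.contains_empty _
  have hndk : (List.map (fun q => q.2) (PySem.List.enumerate L)).Nodup := by
    rw [PySem.List.map_snd_enumerate]; exact hnd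
  have hitems := PySem.Dict.items_foldl_insert_fresh (PySem.List.enumerate L)
    (fun q => q.2) (fun q => q.1) PySem.Dict.empty hfresh hndk
  have hmem : ((r : Int), i) ∈ PySem.List.enumerate L := by
    rw [PySem.List.mem_enumerate_iff]
    have hr : r < L.length := by
      by_contra hr
      rw [List.getElem?_eq_none (by omega)] at h
      simp at h
    exact ⟨r, hr, by simp [List.getElem?_eq_getElem hr] at h; simp [h]⟩
  have hnk : ((PySem.List.enumerate L).foldl (fun inner q => inner.insert q.2 q.1)
      (PySem.Dict.empty : PySem.Dict Int Int)).keys.Nodup := by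
    exact PySem.Dict.nodup_keys_foldl_insert_key (PySem.List.enumerate L)
      (fun q => q.2) (fun _ q => q.1) PySem.Dict.empty (by simp [PySem.Dict.keys_empty])
  refine PySem.Dict.getD_of_mem_items _ ?_ hnk 0
  rw [hitems]
  have : (PySem.Dict.empty : PySem.Dict Int Int).items = [] := rfl
  rw [this, List.nil_append, List.mem_map]
  exact ⟨((r : Int), i), hmem, rfl⟩

-- the outer ranks dict: items are (test index, rank dict of that test's ranking)
lemma pv_indexes_items (res : List (List Int)) :
    (pvIndexes res).items = (PySem.List.enumerate res).map
      (fun p => (p.1, (PySem.List.enumerate p.2).foldl (fun inner q => inner.insert q.2 q.1) PySem.Dict.empty)) := by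
  unfold pvIndexes
  have hfresh : ∀ p ∈ PySem.List.enumerate res,
      (PySem.Dict.empty : PySem.Dict Int (PySem.Dict Int Int)).contains p.1 = false :=
    fun p _ => PySem.Dict.contains_empty _
  have hndk : (List.map (fun p => p.1) (PySem.List.enumerate res)).Nodup := by
    rw [PySem.List.map_fst_enumerate]; exact PySem.List.nodup_pyRange_one _ _
  have := PySem.Dict.items_foldl_insert_fresh (PySem.List.enumerate res)
    (fun p => p.1)
    (fun p => (PySem.List.enumerate p.2).foldl (fun inner q => inner.insert q.2 q.1) PySem.Dict.empty)
    PySem.Dict.empty hfresh hndk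
  rw [this]
  have he : (PySem.Dict.empty : PySem.Dict Int (PySem.Dict Int Int)).items = [] := rfl
  rw [he, List.nil_append]

lemma pv_indexes_keys (res : List (List Int)) :
    (pvIndexes res).keys = PySem.List.pyRange 0 (res.length : Int) 1 := by
  have : (pvIndexes res).keys = (pvIndexes res).items.map (fun p => p.1) := rfl
  rw [this, pv_indexes_items, List.map_map]
  have : ((fun p : Int × PySem.Dict Int Int => p.1) ∘
      (fun p : Int × List Int => (p.1, (PySem.List.enumerate p.2).foldl (fun inner q => inner.insert q.2 q.1) PySem.Dict.empty)))
      = fun p : Int × List Int => p.1 := rfl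
  rw [this, PySem.List.map_fst_enumerate, zero_add]

lemma pv_indexes_getD (res : List (List Int)) (t : Nat) (ht : t < res.length) :
    (pvIndexes res).getD (t : Int) PySem.Dict.empty
      = (PySem.List.enumerate res[t]).foldl (fun inner q => inner.insert q.2 q.1) PySem.Dict.empty := by
  have hnk : (pvIndexes res).keys.Nodup := by
    rw [pv_indexes_keys]; exact PySem.List.nodup_pyRange_one _ _
  refine PySem.Dict.getD_of_mem_items _ ?_ hnk _
  rw [pv_indexes_items, List.mem_map]
  refine ⟨((t : Int), res[t]), ?_, rfl⟩
  rw [PySem.List.mem_enumerate_iff]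
  exact ⟨t, ht, by rw [zero_add]⟩

-- A's borda_counts dict: keys are ids, values are g id
lemma pv_borda_items (ids : List Int) (g : Int → Int) (hnd : ids.Nodup) :
    (ids.foldl (fun b idx => b.insert idx (g idx)) PySem.Dict.empty).items
      = ids.map (fun i => (i, g i)) := by
  have hfresh : ∀ a ∈ ids, (PySem.Dict.empty : PySem.Dict Int Int).contains a = false :=
    fun a _ => PySem.Dict.contains_empty _
  have hndk : (List.map (fun a => a) ids).Nodup := by simpa using hnd
  have := PySem.Dict.items_foldl_insert_fresh ids (fun a => a) g PySem.Dict.empty hfresh hndk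
  rw [this]
  have he : (PySem.Dict.empty : PySem.Dict Int Int).items = [] := rfl
  rw [he, List.nil_append]

lemma pv_borda_keys (ids : List Int) (g : Int → Int) (hnd : ids.Nodup) :
    (ids.foldl (fun b idx => b.insert idx (g idx)) PySem.Dict.empty).keys = ids := by
  have : (ids.foldl (fun b idx => b.insert idx (g idx)) PySem.Dict.empty).keys
      = (ids.foldl (fun b idx => b.insert idx (g idx)) PySem.Dict.empty).items.map (fun p => p.1) := rfl
  rw [this, pv_borda_items ids g hnd, List.map_map]
  simp [Function.comp_def]

lemma pv_borda_getD (ids : List Int) (g : Int → Int) (hnd : ids.Nodup) (i : Int) (hi : i ∈ ids) :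
    (ids.foldl (fun b idx => b.insert idx (g idx)) PySem.Dict.empty).getD i 0 = g i := by
  refine PySem.Dict.getD_of_mem_items _ ?_ ?_ _
  · rw [pv_borda_items ids g hnd, List.mem_map]; exact ⟨i, hi, rfl⟩
  · rw [pv_borda_keys ids g hnd]; exact hnd

-- max2? with identical tie-break key and pointwise-equal primary keys agrees
def pvMaxStep (g : Int → Int) (acc : Option Int) (x : Int) : Option Int :=
  match acc with
  | none => some x
  | some m => if (decide (g m < g x) || !decide (g x < g m) && decide (m < x)) = true then some x else some m

lemma pv_max2_eq_fold (g : Int → Int) (xs : List Int) :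
    PySem.List.max2? xs g (fun x => x) = xs.foldl (pvMaxStep g) none := by
  unfold PySem.List.max2?
  exact PySem.List.foldl_congr_mem xs _ _ none (fun acc x _ => by cases acc <;> rfl)

lemma pv_max2_fold_congr (g g' : Int → Int) :
    ∀ (xs : List Int) (acc : Option Int), (∀ x ∈ xs, g x = g' x) → (∀ m ∈ acc, g m = g' m) →
    xs.foldl (pvMaxStep g) acc = xs.foldl (pvMaxStep g') acc := by
  intro xs
  induction xs with
  | nil => intro acc _ _; rfl
  | cons x t ih =>
    intro acc h hacc
    have hx : g x = g' x := h x (List.mem_cons_self)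
    have ht : ∀ y ∈ t, g y = g' y := fun y hy => h y (List.mem_cons_of_mem _ hy)
    cases acc with
    | none =>
      simp only [List.foldl_cons, pvMaxStep]
      exact ih (some x) ht (by intro m hm; rw [Option.mem_def, Option.some.injEq] at hm; subst hm; exact hx)
    | some m =>
      have hm : g m = g' m := hacc m rfl
      simp only [List.foldl_cons, pvMaxStep]
      rw [hx, hm]
      by_cases hc : (decide (g' m < g' x) || !decide (g' x < g' m) && decide (m < x)) = true
      · rw [if_pos hc]
        exact ih (some x) ht (by intro w hw; rw [Option.mem_def, Option.some.injEq] at hw; subst hw; exact hx)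
      · rw [if_neg hc]
        exact ih (some m) ht (by intro w hw; rw [Option.mem_def, Option.some.injEq] at hw; subst hw; exact hm)

lemma pv_max2_congr (xs : List Int) (g g' : Int → Int) (h : ∀ x ∈ xs, g x = g' x) :
    PySem.List.max2? xs g (fun x => x) = PySem.List.max2? xs g' (fun x => x) := by
  rw [pv_max2_eq_fold, pv_max2_eq_fold]
  exact pv_max2_fold_congr g g' xs none h (by intro m hm; simp at hm)

-- per candidate: A's Borda count via rank dictionaries equals B's pairwise tally
lemma pv_count_eq (d : PySem.Dict Int (List Int)) (hnd : d.keys.Nodup) (n : Int) (hn : 0 ≤ n)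
    (i : Int) (hi : i ∈ d.keys) :
    pvGetCount i (pvIndexes ((PySem.List.pyRange 0 n 1).map (fun j =>
        PySem.List.sorted2 d.keys (fun x => (PySem.List.pyGet? (d.getD x []) j).getD 0) (fun x => x) true)))
      ((d.keys.length : Int))
    = ((PySem.List.pyRange 0 n 1).map (fun j =>
        ((List.length (d.keys.filter (fun c => decide ((PySem.List.pyGet? (d.getD c []) j).getD 0 < (PySem.List.pyGet? (d.getD i []) j).getD 0
          ∨ ((PySem.List.pyGet? (d.getD c []) j).getD 0 = (PySem.List.pyGet? (d.getD i []) j).getD 0 ∧ c < i))))) : Int))).sum := by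
  unfold pvGetCount
  have hlen : ((PySem.List.pyRange 0 n 1).map (fun j =>
      PySem.List.sorted2 d.keys (fun x => (PySem.List.pyGet? (d.getD x []) j).getD 0) (fun x => x) true)).length = n.toNat := by
    rw [List.length_map, PySem.List.length_pyRange_one]; omega
  rw [pv_indexes_keys, hlen, Int.toNat_of_nonneg hn]
  refine congrArg List.sum (List.map_congr_left ?_)
  intro j hj
  obtain ⟨hj0, hjn⟩ := PySem.List.mem_pyRange_one.mp hj
  have hcast : ((j.toNat : Int)) = j := Int.toNat_of_nonneg hj0
  have hjt : j.toNat < ((PySem.List.pyRange 0 n 1).map (fun j =>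
      PySem.List.sorted2 d.keys (fun x => (PySem.List.pyGet? (d.getD x []) j).getD 0) (fun x => x) true)).length := by
    rw [hlen]; omega
  rw [← hcast, pv_indexes_getD _ j.toNat hjt]
  rw [List.getElem_map]
  rw [PySem.List.getElem_pyRange_one, zero_add, hcast]
  rw [pv_sorted2_eq_sorted]
  have hperm := PySem.List.sorted_perm d.keys
    (pvKey (fun x => (PySem.List.pyGet? (d.getD x []) j).getD 0)) true
  have hLnd := hperm.nodup_iff.mpr hnd
  have hiL := hperm.mem_iff.mpr hi
  obtain ⟨r, hr⟩ := List.mem_iff_getElem?.mp hiL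
  rw [pv_inner_getD _ hLnd r i hr]
  have hpred : (fun c => decide ((PySem.List.pyGet? (d.getD c []) j).getD 0 < (PySem.List.pyGet? (d.getD i []) j).getD 0
          ∨ ((PySem.List.pyGet? (d.getD c []) j).getD 0 = (PySem.List.pyGet? (d.getD i []) j).getD 0 ∧ c < i)))
      = (fun c => decide (pvKey (fun x => (PySem.List.pyGet? (d.getD x []) j).getD 0) c
          < pvKey (fun x => (PySem.List.pyGet? (d.getD x []) j).getD 0) i)) := by
    funext c; simp [pvKey, Prod.Lex.lt_iff]
  rw [hpred, ← List.countP_eq_length_filter, ← hperm.countP_eq]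
  rw [pv_count_lt _ _ r i (pv_sorted_strict d.keys _ hnd) hr]
  have hrlen : r < (PySem.List.sorted d.keys
      (pvKey (fun x => (PySem.List.pyGet? (d.getD x []) j).getD 0)) true).length := by
    by_contra hc
    rw [List.getElem?_eq_none (by omega)] at hr
    simp at hr
  have hl := hperm.length_eq
  omega

-- ===== VERDICT (by name: the statement is the Claim_ definition above) =====
theorem apply_borda_in_dict_spec : Claim_equal_apply_borda_in_dict := by
  unfold Claim_equal_apply_borda_in_dict
  intro results _ hpre
  unfold Spec_apply_borda_in_dict
  unfold apply_borda_in_dict apply_borda_in_dict_alt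
  have hnd : (PySem.Dict.ofList results).keys.Nodup := PySem.Dict.nodup_keys_ofList results
  cases hk : (PySem.Dict.ofList results).keys with
  | nil => simp only [hk]; rfl
  | cons k0 rest =>
    simp only [hk]
    have h0 : PySem.List.pyGet? (k0 :: rest) 0 = some k0 := PySem.List.pyGet?_zero_cons k0 rest
    simp only [h0]
    set d := PySem.Dict.ofList results with hd
    set n : Int := ((d.getD k0 []).length : Int) with hn
    have hn0 : 0 ≤ n := Int.natCast_nonneg _
    have hnd' : (k0 :: rest).Nodup := hk ▸ hnd
    rw [pv_borda_keys _ _ hnd']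
    refine congrArg (fun o => Option.getD o 0) (pv_max2_congr (k0 :: rest) _ _ ?_)
    intro i hi
    rw [pv_borda_getD _ _ hnd' i hi]
    rw [← hk] at hi
    rw [← hk]
    exact pv_count_eq d hnd n hn0 i hi
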